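-- pv_equiv track=rewrite | github.com/jtliames2013/src | python/create-sorted-array-through-instructions.py | createSortedArray
-- ===== SOURCE A (Python) =====
-- from typing import List
--
-- def createSortedArray(instructions: List[int]) -> int:
--     mod=10**9+7
--     mx=max(instructions)
--     res, tree=0, [0]*(mx+1)
--
--     def get(i):
--         res=0
--         while i>0:
--             res+=tree[i]
--             i-=(i&-i)
--         return res
--
--     def update(i):
--         while i<=mx:
--             tree[i]+=1
--             i+=(i&-i)
--
--     for i, v in enumerate(instructions):
--         res+=min(get(v-1), i-get(v))
--         update(v)
--
--     return res%mod
-- ===== SOURCE B (Python) =====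
-- def createSortedArray(instructions):
--     MOD = 10 ** 9 + 7
--     res = 0
--     seen = []
--     for v in instructions:
--         smaller = 0
--         larger = 0
--         for w in seen:
--             if w < v:
--                 smaller += 1
--             elif w > v:
--                 larger += 1
--         res += min(smaller, larger)
--         seen.append(v)
--     return res % MOD
-- ===== Notes on version B (the rewrite author's own statement) =====
-- stated objective: simpler
-- what changed: Replaces the Fenwick (binary indexed) tree and its bit-twiddling prefix-sum loops with a direct scan of the already-processed prefix that counts elements smaller and larger than the current value.
-- outside the precondition, e.g. on createSortedArray([]): A raises ValueError, B returns 0; on createSortedArray([0, 2]): A does not finish within the time limit, B returns 0; on createSortedArray([-3, -5]): A raises IndexError, B returns 0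
import Mathlib
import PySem

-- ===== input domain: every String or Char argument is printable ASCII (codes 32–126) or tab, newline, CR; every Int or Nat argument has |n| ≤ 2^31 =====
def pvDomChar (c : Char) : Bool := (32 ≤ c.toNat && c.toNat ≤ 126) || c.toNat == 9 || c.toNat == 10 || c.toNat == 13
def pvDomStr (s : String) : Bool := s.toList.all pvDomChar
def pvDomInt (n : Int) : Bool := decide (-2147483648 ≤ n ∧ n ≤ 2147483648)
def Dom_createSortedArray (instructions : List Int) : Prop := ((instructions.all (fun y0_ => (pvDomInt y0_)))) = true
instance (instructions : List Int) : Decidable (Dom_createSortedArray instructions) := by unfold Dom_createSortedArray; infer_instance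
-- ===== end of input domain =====

-- B replaces A's Fenwick (binary indexed) tree with a direct scan of the already-processed
-- prefix counting smaller/larger elements: simpler, no bit manipulation (not faster).

-- ===== PORT A =====
-- 'def get(i): res=0; while i>0: res+=tree[i]; i-=(i&-i); return res'
-- fuel i.toNat bounds the iterations: while 0 < i the index decreases by at least 1 each step.
def pvGetLoop (tree : List Int) : Nat → Int → Int → Int
  | 0, _, res => res
  | fuel+1, i, res =>
    if 0 < i then
      pvGetLoop tree fuel (i - PySem.Int.band i (-i)) (res + PySem.List.pyGetD tree i 0)
    else res

-- 'def update(i): while i<=mx: tree[i]+=1; i+=(i&-i)'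
-- fuel (mx + 1 - i).toNat bounds the iterations: the index increases by at least 1 each step.
def pvUpdLoop (mx : Int) : Nat → Int → List Int → List Int
  | 0, _, tree => tree
  | fuel+1, i, tree =>
    if i ≤ mx then
      pvUpdLoop mx fuel (i + PySem.Int.band i (-i)) (PySem.List.pySetD tree i (PySem.List.pyGetD tree i 0 + 1))
    else tree

def createSortedArray (instructions : List Int) : Int :=
  let md : Int := 10 ^ 9 + 7
  match PySem.List.max? instructions (fun x => x) with
  | none => 0      -- Python: max([]) raises ValueError; excluded by Pre_
  | some mx =>
      let tree : List Int := List.replicate (mx + 1).toNat 0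
      let r := (PySem.List.enumerate instructions).foldl
        (fun acc iv =>
          (acc.1 + min (pvGetLoop acc.2 (iv.2 - 1).toNat (iv.2 - 1) 0)
                       (iv.1 - pvGetLoop acc.2 iv.2.toNat iv.2 0),
           pvUpdLoop mx (mx + 1 - iv.2).toNat iv.2 acc.2))
        (0, tree)
      PySem.Int.mod r.1 md

-- ===== PORT B =====
def createSortedArray_alt (instructions : List Int) : Int :=
  let md : Int := 10 ^ 9 + 7
  let r := instructions.foldl
    (fun acc v =>
      let c := acc.2.foldl
        (fun (sl : Int × Int) w =>
          if w < v then (sl.1 + 1, sl.2) else if v < w then (sl.1, sl.2 + 1) else sl)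
        ((0 : Int), (0 : Int))
      (acc.1 + min c.1 c.2, acc.2 ++ [v]))
    ((0 : Int), ([] : List Int))
  PySem.Int.mod r.1 md

-- ===== PRECONDITION & SPEC =====
-- Pre_ excludes exactly the inputs on which Python A never returns: the empty list
-- (max([]) raises ValueError) and lists containing a value ≤ 0 (update(v) then either
-- loops forever on the index 0 chain or indexes outside the tree, raising IndexError).
def Pre_createSortedArray (instructions : List Int) : Prop :=
  instructions ≠ [] ∧ ∀ x ∈ instructions, 1 ≤ x
instance (instructions : List Int) : Decidable (Pre_createSortedArray instructions) := by
  unfold Pre_createSortedArray; infer_instance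

def pvWitness_createSortedArray : List Int := [1, 5, 6, 2]

def Spec_createSortedArray (instructions : List Int) (out : Int) : Prop := out = createSortedArray_alt instructions
instance (instructions : List Int) (out : Int) : Decidable (Spec_createSortedArray instructions out) := by unfold Spec_createSortedArray; infer_instance

-- ===== CLAIM (what is proved, stated in full; the proofs are below) =====
def Claim_equal_createSortedArray : Prop := ∀ (instructions : List Int), Dom_createSortedArray instructions → Pre_createSortedArray instructions → Spec_createSortedArray instructions (createSortedArray instructions)

-- ===== LEMMAS AND PROOFS =====

theorem pv_and_even_odd (a b : Nat) : (2*a) &&& (2*b+1) = 2*(a &&& b) := by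
  apply Nat.eq_of_testBit_eq
  intro i
  cases i with
  | zero =>
      simp [Nat.testBit_zero, Nat.mul_mod_right]
  | succ i =>
      rw [Nat.testBit_succ, Nat.testBit_succ, Nat.and_div_two,
        show (2*a)/2 = a by omega, show (2*b+1)/2 = b by omega,
        show (2*(a &&& b))/2 = a &&& b by omega]

theorem pv_and_odd_even (a b : Nat) : (2*a+1) &&& (2*b) = 2*(a &&& b) := by
  apply Nat.eq_of_testBit_eq
  intro i
  cases i with
  | zero =>
      simp [Nat.testBit_zero, Nat.mul_mod_right]
  | succ i =>
      rw [Nat.testBit_succ, Nat.testBit_succ, Nat.and_div_two,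
        show (2*a+1)/2 = a by omega, show (2*b)/2 = b by omega,
        show (2*(a &&& b))/2 = a &&& b by omega]

def pvLowbit : Nat → Nat
  | 0 => 0
  | (n+1) => if (n+1) % 2 = 1 then 1 else 2 * pvLowbit ((n+1)/2)
decreasing_by omega

theorem pvLowbit_odd {n : Nat} (h : n % 2 = 1) : pvLowbit n = 1 := by
  cases n with
  | zero => omega
  | succ m => rw [pvLowbit]; simp [h]

theorem pvLowbit_even {n : Nat} (h0 : 0 < n) (h : n % 2 = 0) :
    pvLowbit n = 2 * pvLowbit (n / 2) := by
  cases n with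
  | zero => omega
  | succ m => rw [pvLowbit]; simp [h]

theorem pvLowbit_pos {n : Nat} (h : 0 < n) : 0 < pvLowbit n := by
  induction n using Nat.strong_induction_on with
  | _ n ih =>
    rcases (Nat.even_or_odd n).imp Nat.even_iff.mp Nat.odd_iff.mp with he | ho
    · rw [pvLowbit_even h (by omega : n % 2 = 0)]
      have := ih (n/2) (by omega) (by omega)
      omega
    · rw [pvLowbit_odd (by omega : n % 2 = 1)]; omega

theorem pvLowbit_le {n : Nat} (h : 0 < n) : pvLowbit n ≤ n := by
  induction n using Nat.strong_induction_on with
  | _ n ih =>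
    rcases (Nat.even_or_odd n).imp Nat.even_iff.mp Nat.odd_iff.mp with he | ho
    · rw [pvLowbit_even h (by omega : n % 2 = 0)]
      have := ih (n/2) (by omega) (by omega)
      omega
    · rw [pvLowbit_odd (by omega : n % 2 = 1)]; omega

theorem pvLowbit_bridge {n : Nat} (h : 0 < n) : n &&& (n - 1) = n - pvLowbit n := by
  induction n using Nat.strong_induction_on with
  | _ n ih =>
    rcases (Nat.even_or_odd n).imp Nat.even_iff.mp Nat.odd_iff.mp with he | ho
    · -- n = 2*(n/2), n/2 ≥ 1
      have h2 : 0 < n / 2 := by omega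
      have hn : n = 2 * (n / 2) := by omega
      have hm1 : n - 1 = 2 * (n / 2 - 1) + 1 := by omega
      rw [pvLowbit_even h (by omega : n % 2 = 0)]
      calc n &&& (n-1) = (2*(n/2)) &&& (2*(n/2-1)+1) := by rw [← hn, ← hm1]
        _ = 2 * ((n/2) &&& (n/2 - 1)) := pv_and_even_odd _ _
        _ = 2 * (n/2 - pvLowbit (n/2)) := by rw [ih (n/2) (by omega) h2]
        _ = n - 2 * pvLowbit (n/2) := by
            have := pvLowbit_le h2
            omega
    · have hn : n = 2 * (n / 2) + 1 := by omega
      have hm1 : n - 1 = 2 * (n / 2) := by omega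
      rw [pvLowbit_odd (by omega : n % 2 = 1)]
      calc n &&& (n-1) = (2*(n/2)+1) &&& (2*(n/2)) := by rw [← hn, ← hm1]
        _ = 2 * ((n/2) &&& (n/2)) := pv_and_odd_even _ _
        _ = 2 * (n/2) := by rw [Nat.and_self]
        _ = n - 1 := by omega

theorem pvLowbit_step {n : Nat} (h : 0 < n) :
    2 * pvLowbit n ≤ pvLowbit (n + pvLowbit n) := by
  induction n using Nat.strong_induction_on with
  | _ n ih =>
    rcases (Nat.even_or_odd n).imp Nat.even_iff.mp Nat.odd_iff.mp with he | ho
    · have h2 : 0 < n / 2 := by omega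
      have hlb := pvLowbit_even h (by omega : n % 2 = 0)
      rw [hlb]
      have hp2 : 0 < pvLowbit (n/2) := pvLowbit_pos h2
      have hsum : n + 2 * pvLowbit (n/2) = 2 * (n/2 + pvLowbit (n/2)) := by omega
      rw [hsum, pvLowbit_even (n := 2 * (n/2 + pvLowbit (n/2))) (by omega) (by omega),
        show (2 * (n/2 + pvLowbit (n/2))) / 2 = n/2 + pvLowbit (n/2) by omega]
      have := ih (n/2) (by omega) h2
      omega
    · have hlb := pvLowbit_odd (by omega : n % 2 = 1)
      rw [hlb]
      have hsum : n + 1 = 2 * ((n+1)/2) := by omega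
      rw [hsum, pvLowbit_even (n := 2 * ((n+1)/2)) (by omega) (by omega),
        show (2 * ((n+1)/2)) / 2 = (n+1)/2 by omega]
      have : 0 < pvLowbit ((n+1)/2) := pvLowbit_pos (by omega)
      omega

theorem pvLowbit_gap {n r : Nat} (hr : 0 < r) (hlt : r < pvLowbit n) :
    pvLowbit (n + r) = pvLowbit r := by
  induction n using Nat.strong_induction_on generalizing r with
  | _ n ih =>
    have hn : 0 < n := by
      rcases Nat.eq_zero_or_pos n with h0 | h0
      · subst h0; simp [pvLowbit] at hlt
      · exact h0
    rcases (Nat.even_or_odd n).imp Nat.even_iff.mp Nat.odd_iff.mp with he | ho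
    · have h2 : 0 < n / 2 := by omega
      have hlb := pvLowbit_even hn (by omega : n % 2 = 0)
      rcases (Nat.even_or_odd r).imp Nat.even_iff.mp Nat.odd_iff.mp with hre | hro
      · -- r = 2s
        have hs : 0 < r / 2 := by omega
        have hsum : n + r = 2 * (n/2 + r/2) := by omega
        rw [hsum, pvLowbit_even (by omega) (by omega),
          show (2 * (n/2 + r/2)) / 2 = n/2 + r/2 by omega,
          ih (n/2) (by omega) hs (by omega),
          ← pvLowbit_even (by omega : 0 < r) (by omega)]
      · have : (n + r) % 2 = 1 := by omega
        rw [pvLowbit_odd this, pvLowbit_odd (by omega : r % 2 = 1)]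
    · rw [pvLowbit_odd (by omega : n % 2 = 1)] at hlt; omega

-- lowbit transported to Int: for 0 < i, Python's i & -i is pvLowbit of i.toNat
def pvLb (i : Int) : Int := (pvLowbit i.toNat : Int)

theorem pv_band_lowbit {i : Int} (h : 0 < i) : PySem.Int.band i (-i) = pvLb i := by
  have h1 : (0:Int) ≤ i := le_of_lt h
  have h2 : ¬ (0:Int) ≤ -i := by omega
  simp only [PySem.Int.band, if_pos h1, if_neg h2]
  have he : (-(-i) - 1).toNat = i.toNat - 1 := by omega
  rw [he, pvLowbit_bridge (by omega : 0 < i.toNat)]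
  have hle := pvLowbit_le (n := i.toNat) (by omega)
  unfold pvLb
  omega

theorem pvLb_pos {i : Int} (h : 0 < i) : 1 ≤ pvLb i := by
  have := pvLowbit_pos (n := i.toNat) (by omega)
  unfold pvLb; omega

theorem pvLb_le {i : Int} (h : 0 < i) : pvLb i ≤ i := by
  have := pvLowbit_le (n := i.toNat) (by omega)
  unfold pvLb; omega

theorem pvLb_step {i : Int} (h : 0 < i) : 2 * pvLb i ≤ pvLb (i + pvLb i) := by
  have h1 := pvLowbit_pos (n := i.toNat) (by omega)
  have h2 : (i + pvLb i).toNat = i.toNat + pvLowbit i.toNat := by unfold pvLb; omega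
  have h3 := pvLowbit_step (n := i.toNat) (by omega)
  unfold pvLb at h2 ⊢
  rw [h2]
  omega

theorem pvLb_gap {i j : Int} (hi : 0 < i) (hij : i < j) (hj : j < i + pvLb i) :
    pvLb j ≤ j - i := by
  have h1 := pvLowbit_pos (n := i.toNat) (by omega)
  have h2 : j.toNat = i.toNat + (j - i).toNat := by omega
  have h3 : (j - i).toNat < pvLowbit i.toNat := by unfold pvLb at hj; omega
  have h4 := pvLowbit_gap (n := i.toNat) (r := (j - i).toNat) (by omega) h3
  have h5 := pvLowbit_le (n := (j - i).toNat) (by omega)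
  unfold pvLb
  rw [h2, h4]
  omega

-- the count of elements ≤ j (the Fenwick prefix sum A maintains)
def pvCnt (m : List Int) (j : Int) : Int := (m.countP (fun x => decide (x ≤ j)) : Int)

theorem pvCnt_nonpos {m : List Int} (hm : ∀ x ∈ m, 1 ≤ x) {j : Int} (hj : j ≤ 0) :
    pvCnt m j = 0 := by
  unfold pvCnt
  have : m.countP (fun x => decide (x ≤ j)) = 0 := by
    rw [List.countP_eq_zero]
    intro x hx
    have := hm x hx
    simp; omega
  rw [this]; rfl

theorem pvCnt_append (m : List Int) (v j : Int) :
    pvCnt (m ++ [v]) j = pvCnt m j + (if v ≤ j then 1 else 0) := by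
  unfold pvCnt
  rw [List.countP_append]
  by_cases h : v ≤ j <;> simp [h]

-- the Fenwick-tree invariant: cell j holds the number of recorded values in (j - lowbit j, j]
def pvInv (mx : Int) (tree m : List Int) : Prop :=
  tree.length = (mx + 1).toNat ∧
  ∀ j : Int, 1 ≤ j → j ≤ mx →
    PySem.List.pyGetD tree j 0 = pvCnt m j - pvCnt m (j - pvLb j)

theorem pv_get_eval {m tree : List Int} {mx : Int}
    (hinv : pvInv mx tree m) (hm : ∀ x ∈ m, 1 ≤ x) :
    ∀ (k : Nat) (i res : Int), 0 ≤ i → i ≤ mx → i.toNat ≤ k →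
      pvGetLoop tree k i res = res + pvCnt m i := by
  intro k
  induction k with
  | zero =>
    intro i res h0 hmx hk
    have hi : i = 0 := by omega
    subst hi
    simp only [pvGetLoop]
    rw [pvCnt_nonpos hm (by omega)]
    ring
  | succ k ih =>
    intro i res h0 hmx hk
    by_cases hip : 0 < i
    · simp only [pvGetLoop, if_pos hip]
      rw [pv_band_lowbit hip]
      have hlb1 := pvLb_pos hip
      have hlble := pvLb_le hip
      rw [ih (i - pvLb i) _ (by omega) (by omega) (by omega)]
      rw [hinv.2 i (by omega) hmx]
      ring
    · have hi : i = 0 := by omega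
      subst hi
      simp only [pvGetLoop, if_neg hip]
      rw [pvCnt_nonpos hm (by omega)]
      ring

-- one pyGetD/pySetD exchange at nonnegative in-range Int indices
theorem pv_getD_setD (tree : List Int) (i j w : Int) (hi0 : 0 ≤ i) (hj0 : 0 ≤ j)
    (hilen : i.toNat < tree.length) :
    PySem.List.pyGetD (PySem.List.pySetD tree i w) j 0 =
      if j = i then w else PySem.List.pyGetD tree j 0 := by
  obtain ⟨ni, rfl⟩ : ∃ n : Nat, i = (n : Int) := ⟨i.toNat, (Int.toNat_of_nonneg hi0).symm⟩
  obtain ⟨nj, rfl⟩ : ∃ n : Nat, j = (n : Int) := ⟨j.toNat, (Int.toNat_of_nonneg hj0).symm⟩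
  rw [PySem.List.pyGetD_pySetD_natCast tree ni nj w 0 (by omega)]
  by_cases h : nj = ni
  · rw [if_pos h, if_pos (by exact_mod_cast h)]
  · rw [if_neg h, if_neg (by exact_mod_cast h)]

theorem pv_upd_eval (mx v : Int) (f : Int → Int) (hv1 : 1 ≤ v) :
    ∀ (k : Nat) (i : Int) (tree : List Int),
      v ≤ i → i - pvLb i < v →
      tree.length = (mx + 1).toNat →
      (∀ j : Int, 1 ≤ j → j ≤ mx →
        PySem.List.pyGetD tree j 0 = f j + (if j - pvLb j < v ∧ v ≤ j ∧ j < i then 1 else 0)) →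
      (mx - i + 1).toNat ≤ k →
      (pvUpdLoop mx k i tree).length = (mx + 1).toNat ∧
      ∀ j : Int, 1 ≤ j → j ≤ mx →
        PySem.List.pyGetD (pvUpdLoop mx k i tree) j 0
          = f j + (if j - pvLb j < v ∧ v ≤ j then 1 else 0) := by
  intro k
  induction k with
  | zero =>
    intro i tree hvi hcov hlen htree hk
    refine ⟨hlen, ?_⟩
    intro j hj1 hj2
    simp only [pvUpdLoop]
    rw [htree j hj1 hj2]
    have : (j - pvLb j < v ∧ v ≤ j ∧ j < i) ↔ (j - pvLb j < v ∧ v ≤ j) := by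
      constructor
      · rintro ⟨a, b, _⟩; exact ⟨a, b⟩
      · rintro ⟨a, b⟩; exact ⟨a, b, by omega⟩
    rw [if_congr this rfl rfl]
  | succ k ih =>
    intro i tree hvi hcov hlen htree hk
    by_cases hi : i ≤ mx
    · simp only [pvUpdLoop, if_pos hi]
      have hip : 0 < i := by omega
      rw [pv_band_lowbit hip]
      have hlb1 := pvLb_pos hip
      have hlble := pvLb_le hip
      have hstep := pvLb_step hip
      have hlen1 : (PySem.List.pySetD tree i (PySem.List.pyGetD tree i 0 + 1)).length
          = (mx + 1).toNat := by
        rw [PySem.List.length_pySetD, hlen]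
      refine ih (i + pvLb i) _ (by omega) (by omega) hlen1 ?_ (by omega)
      intro j hj1 hj2
      rw [pv_getD_setD tree i j _ (by omega) (by omega) (by omega)]
      by_cases hji : j = i
      · subst hji
        rw [if_pos rfl, htree j hj1 hj2,
          if_neg (by rintro ⟨_, _, h⟩; omega),
          if_pos ⟨hcov, hvi, by omega⟩]
        ring
      · rw [if_neg hji, htree j hj1 hj2]
        by_cases hlt : j < i
        · have hiff : (j - pvLb j < v ∧ v ≤ j ∧ j < i) ↔ (j - pvLb j < v ∧ v ≤ j ∧ j < i + pvLb i) :=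
            ⟨fun ⟨a, b, _⟩ => ⟨a, b, by omega⟩, fun ⟨a, b, _⟩ => ⟨a, b, hlt⟩⟩
          rw [if_congr hiff rfl rfl]
        · -- i < j: no index strictly between i and i + lowbit i is on the update chain
          have hno : ¬ (j - pvLb j < v ∧ v ≤ j ∧ j < i + pvLb i) := by
            rintro ⟨ha, hb, hc⟩
            have hgap := pvLb_gap hip (by omega) hc
            omega
          rw [if_neg (by rintro ⟨_, _, _⟩; omega), if_neg hno]
    · simp only [pvUpdLoop, if_neg hi]
      refine ⟨hlen, ?_⟩
      intro j hj1 hj2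
      rw [htree j hj1 hj2]
      have hiff : (j - pvLb j < v ∧ v ≤ j ∧ j < i) ↔ (j - pvLb j < v ∧ v ≤ j) :=
        ⟨fun ⟨a, b, _⟩ => ⟨a, b⟩, fun ⟨a, b⟩ => ⟨a, b, by omega⟩⟩
      rw [if_congr hiff rfl rfl]

theorem pv_inv_init (mx : Int) :
    pvInv mx (List.replicate (mx + 1).toNat 0) [] := by
  refine ⟨by simp, ?_⟩
  intro j hj1 hj2
  have hz : ∀ i : Int, PySem.List.pyGetD (List.replicate (mx + 1).toNat (0:Int)) i 0 = 0 := by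
    intro i
    unfold PySem.List.pyGetD PySem.List.pyGet?
    cases PySem.List.pyIdx? (List.replicate (mx + 1).toNat (0:Int)).length i with
    | none => rfl
    | some k =>
      simp only [Option.bind_some, List.getElem?_replicate]
      by_cases h : k < (mx + 1).toNat <;> simp [h]
  rw [hz]
  unfold pvCnt
  simp

theorem pv_inv_update {mx v : Int} {tree m : List Int}
    (hinv : pvInv mx tree m) (hv1 : 1 ≤ v) (hvmx : v ≤ mx) :
    pvInv mx (pvUpdLoop mx (mx + 1 - v).toNat v tree) (m ++ [v]) := by
  have hlb1 := pvLb_pos (show (0:Int) < v by omega)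
  have hlble := pvLb_le (show (0:Int) < v by omega)
  have h := pv_upd_eval mx v (fun j => pvCnt m j - pvCnt m (j - pvLb j)) hv1
      (mx + 1 - v).toNat v tree (le_refl v) (by omega) hinv.1
      (by
        intro j hj1 hj2
        rw [hinv.2 j hj1 hj2, if_neg (by rintro ⟨_, b, c⟩; omega)]
        ring)
      (by omega)
  refine ⟨h.1, ?_⟩
  intro j hj1 hj2
  rw [h.2 j hj1 hj2, pvCnt_append, pvCnt_append]
  have hjlb1 := pvLb_pos (show (0:Int) < j by omega)
  have hjlble := pvLb_le (show (0:Int) < j by omega)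
  beta_reduce
  split_ifs <;> omega

-- B's inner scan computes the two counts
theorem pv_inner_counts (seen : List Int) (v : Int) :
    seen.foldl
      (fun (sl : Int × Int) w =>
        if w < v then (sl.1 + 1, sl.2) else if v < w then (sl.1, sl.2 + 1) else sl)
      ((0 : Int), (0 : Int))
    = ((seen.countP (fun w => decide (w < v)) : Int),
       (seen.countP (fun w => decide (v < w)) : Int)) := by
  induction seen using List.reverseRecOn with
  | nil => simp
  | append_singleton xs x ihx =>
    rw [List.foldl_append, ihx, List.countP_append, List.countP_append]
    by_cases h1 : x < v
    · simp [h1, show ¬ v < x by omega]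
    · by_cases h2 : v < x <;> simp [h1, h2]

-- counting bridges between A's prefix sums and B's scan counts
theorem pv_count_lt (seen : List Int) (v : Int) :
    pvCnt seen (v - 1) = (seen.countP (fun w => decide (w < v)) : Int) := by
  unfold pvCnt
  congr 1
  apply List.countP_congr
  intro x _
  simp only [decide_eq_true_eq]
  omega

theorem pv_count_sum (seen : List Int) (v : Int) :
    seen.countP (fun x => decide (x ≤ v)) + seen.countP (fun w => decide (v < w)) = seen.length := by
  induction seen with
  | nil => simp
  | cons a t iht =>
    rw [List.countP_cons, List.countP_cons]
    by_cases h : a ≤ v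
    · simp [h, show ¬ v < a by omega]; omega
    · simp [h, show v < a by omega]; omega

theorem pv_count_gt (seen : List Int) (v : Int) :
    (seen.length : Int) - pvCnt seen v = (seen.countP (fun w => decide (v < w)) : Int) := by
  unfold pvCnt
  have := pv_count_sum seen v
  omega

-- the common specification fold: scan-count step on the processed prefix
def pvSpecStep (acc : Int × List Int) (v : Int) : Int × List Int :=
  (acc.1 + min ((acc.2.countP (fun w => decide (w < v)) : Int))
              ((acc.2.countP (fun w => decide (v < w)) : Int)),
   acc.2 ++ [v])

-- A's Fenwick fold computes the spec fold
theorem pv_main_loop (mx : Int) :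
    ∀ (rest seen tree : List Int) (res : Int),
      (∀ x ∈ seen, 1 ≤ x) → (∀ x ∈ rest, 1 ≤ x ∧ x ≤ mx) →
      pvInv mx tree seen →
      ((PySem.List.enumerate rest (seen.length : Int)).foldl
        (fun acc iv =>
          (acc.1 + min (pvGetLoop acc.2 (iv.2 - 1).toNat (iv.2 - 1) 0)
                       (iv.1 - pvGetLoop acc.2 iv.2.toNat iv.2 0),
           pvUpdLoop mx (mx + 1 - iv.2).toNat iv.2 acc.2))
        (res, tree)).1
      = (rest.foldl pvSpecStep (res, seen)).1 := by
  intro rest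
  induction rest with
  | nil => intro seen tree res hseen hrest hinv; simp [PySem.List.enumerate_nil]
  | cons v rest ih =>
    intro seen tree res hseen hrest hinv
    have hv := hrest v (by simp)
    rw [PySem.List.enumerate_cons, List.foldl_cons, List.foldl_cons]
    rw [pv_get_eval hinv hseen _ (v - 1) 0 (by omega) (by omega) (le_refl _),
      pv_get_eval hinv hseen _ v 0 (by omega) (by omega) (le_refl _)]
    simp only [zero_add]
    rw [pv_count_lt seen v, pv_count_gt seen v]
    have hstep : ((seen.length : Int) + 1) = (((seen ++ [v]).length : Int)) := by
      simp
    rw [hstep]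
    exact ih (seen ++ [v]) _ _
      (by intro x hx
          rcases List.mem_append.mp hx with h | h
          · exact hseen x h
          · simp at h; omega)
      (fun x hx => hrest x (by simp [hx]))
      (pv_inv_update hinv (by omega) (by omega))

-- B's fold is the spec fold: the inner scan is the pair of counts
theorem pv_b_loop (rest : List Int) (acc : Int × List Int) :
    rest.foldl
      (fun acc v =>
        let c := acc.2.foldl
          (fun (sl : Int × Int) w =>
            if w < v then (sl.1 + 1, sl.2) else if v < w then (sl.1, sl.2 + 1) else sl)
          ((0 : Int), (0 : Int))
        (acc.1 + min c.1 c.2, acc.2 ++ [v]))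
      acc
    = rest.foldl pvSpecStep acc := by
  apply PySem.List.foldl_congr_mem
  intro a v _
  show _ = pvSpecStep a v
  unfold pvSpecStep
  rw [pv_inner_counts]

-- ===== VERDICT (by name: the statement is the Claim_ definition above) =====
theorem createSortedArray_spec : Claim_equal_createSortedArray := by
  unfold Claim_equal_createSortedArray
  intro instructions _ hpre
  unfold Spec_createSortedArray createSortedArray createSortedArray_alt
  obtain ⟨hne, hpos⟩ := hpre
  rcases hmx : PySem.List.max? instructions (fun x => x) with _ | mx
  · exact absurd ((PySem.List.max?_eq_none_iff instructions (fun x => x)).mp hmx) hne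
  · simp only
    congr 1
    have hmem := PySem.List.max?_mem hmx
    have hmax := PySem.List.max?_isMax hmx
    rw [pv_b_loop]
    have := pv_main_loop mx instructions [] (List.replicate (mx + 1).toNat 0) 0
      (by intro x hx; simp at hx)
      (by intro x hx; exact ⟨hpos x hx, hmax x hx⟩)
      (pv_inv_init mx)
    simpa using this
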